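-- pv_equiv track=rewrite | github.com/Nevram26/Pangasinense_NLP | midterms/enrich_dictionary.py | guess_pos
-- ===== SOURCE A (Python) =====
-- def guess_pos(translation: str) -> str:
--     """
--     Guess Part of Speech (POS) from the English translation field using heuristics.
--     """
--     if not translation:
--         return "UNKNOWN"
--
--     translation = translation.lower().strip()
--
--     # Verb detection
--     if translation.startswith("to "):
--         return "VERB"
--     if any(x in translation for x in ["(man-", "(maN-", "(on-", "(-en)", "(-an)"]):
--         return "VERB"
--
--     # Noun detection
--     if any(x in translation for x in [
--         "thing", "place", "person", "animal", "tree", "food", "object", "name", "part"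
--     ]):
--         return "NOUN"
--
--     # Adjective detection
--     if any(x in translation for x in [
--         "ugly", "red", "white", "blue", "big", "small", "tired", "good", "bad", "beautiful"
--     ]):
--         return "ADJECTIVE"
--
--     # Adverb detection
--     if any(x in translation for x in [
--         "already", "together", "again", "while", "during", "now", "later", "soon"
--     ]):
--         return "ADVERB"
--
--     # Pronoun detection
--     if any(x in translation for x in [
--         "i", "you", "he", "she", "it", "we", "they", "me", "him", "her", "them"
--     ]):
--         return "PRONOUN"
--
--     # Preposition detection
--     if any(x in translation for x in [
--         "in", "on", "at", "with", "by", "from", "to", "for", "of"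
--     ]):
--         return "PREPOSITION"
--
--     # Default
--     return "UNKNOWN"
--     return morph if morph else None
-- ===== SOURCE B (Python) =====
-- # Text-driven multi-pattern scan: one pass over positions of the normalized
-- # string, matching a flat prioritized keyword table and keeping the minimum
-- # priority matched; final label comes from a table lookup.
-- _LABELS = ["VERB", "NOUN", "ADJECTIVE", "ADVERB", "PRONOUN", "PREPOSITION"]
--
-- _KEYWORDS = [
--     (0, "(man-"), (0, "(maN-"), (0, "(on-"), (0, "(-en)"), (0, "(-an)"),
--     (1, "thing"), (1, "place"), (1, "person"), (1, "animal"), (1, "tree"),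
--     (1, "food"), (1, "object"), (1, "name"), (1, "part"),
--     (2, "ugly"), (2, "red"), (2, "white"), (2, "blue"), (2, "big"),
--     (2, "small"), (2, "tired"), (2, "good"), (2, "bad"), (2, "beautiful"),
--     (3, "already"), (3, "together"), (3, "again"), (3, "while"), (3, "during"),
--     (3, "now"), (3, "later"), (3, "soon"),
--     (4, "i"), (4, "you"), (4, "he"), (4, "she"), (4, "it"), (4, "we"),
--     (4, "they"), (4, "me"), (4, "him"), (4, "her"), (4, "them"),
--     (5, "in"), (5, "on"), (5, "at"), (5, "with"), (5, "by"), (5, "from"),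
--     (5, "to"), (5, "for"), (5, "of"),
-- ]
--
--
-- def guess_pos(translation: str) -> str:
--     if not translation:
--         return "UNKNOWN"
--     t = translation.lower().strip()
--     if t.startswith("to "):
--         return "VERB"
--     best = 6
--     for i in range(len(t)):
--         for prio, kw in _KEYWORDS:
--             if prio < best and t[i:i + len(kw)] == kw:
--                 best = prio
--     return "UNKNOWN" if best == 6 else _LABELS[best]
-- ===== Notes on version B (the rewrite author's own statement) =====
-- stated objective: alternative
-- what changed: Replaces A's cascade of per-category substring searches with a single text-driven scan: one pass over the positions of the normalized string matching a flat prioritized keyword table, accumulating the minimum matched priority, then a final label-table lookup.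
import Mathlib
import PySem

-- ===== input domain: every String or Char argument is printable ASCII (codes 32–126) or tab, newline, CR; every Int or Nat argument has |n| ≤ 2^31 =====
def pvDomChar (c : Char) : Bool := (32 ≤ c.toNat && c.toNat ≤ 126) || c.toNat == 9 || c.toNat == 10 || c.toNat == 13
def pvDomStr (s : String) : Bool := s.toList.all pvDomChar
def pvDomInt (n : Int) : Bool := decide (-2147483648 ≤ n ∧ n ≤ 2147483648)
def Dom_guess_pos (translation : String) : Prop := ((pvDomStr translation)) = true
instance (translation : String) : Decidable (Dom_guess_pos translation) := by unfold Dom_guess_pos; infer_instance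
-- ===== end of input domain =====

-- B replaces A's per-category substring-search cascade with a single text-driven
-- scan over positions matching a flat prioritized keyword table (objective: alternative).

-- ===== PORT A =====
def guess_pos (translation : String) : String :=
  if translation == "" then "UNKNOWN"
  else
    let t := PySem.Str.strip (PySem.Str.lower translation)
    if PySem.Str.startswith t "to " then "VERB"
    else if ["(man-", "(maN-", "(on-", "(-en)", "(-an)"].any (fun x => PySem.Str.isIn x t) then "VERB"
    else if ["thing", "place", "person", "animal", "tree", "food", "object", "name", "part"].any (fun x => PySem.Str.isIn x t) then "NOUN"
    else if ["ugly", "red", "white", "blue", "big", "small", "tired", "good", "bad", "beautiful"].any (fun x => PySem.Str.isIn x t) then "ADJECTIVE"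
    else if ["already", "together", "again", "while", "during", "now", "later", "soon"].any (fun x => PySem.Str.isIn x t) then "ADVERB"
    else if ["i", "you", "he", "she", "it", "we", "they", "me", "him", "her", "them"].any (fun x => PySem.Str.isIn x t) then "PRONOUN"
    else if ["in", "on", "at", "with", "by", "from", "to", "for", "of"].any (fun x => PySem.Str.isIn x t) then "PREPOSITION"
    else "UNKNOWN"

-- ===== PORT B =====
def pvLabels : List String := ["VERB", "NOUN", "ADJECTIVE", "ADVERB", "PRONOUN", "PREPOSITION"]

def pvKeywords : List (Nat × String) :=
  [(0, "(man-"), (0, "(maN-"), (0, "(on-"), (0, "(-en)"), (0, "(-an)"),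
   (1, "thing"), (1, "place"), (1, "person"), (1, "animal"), (1, "tree"),
   (1, "food"), (1, "object"), (1, "name"), (1, "part"),
   (2, "ugly"), (2, "red"), (2, "white"), (2, "blue"), (2, "big"),
   (2, "small"), (2, "tired"), (2, "good"), (2, "bad"), (2, "beautiful"),
   (3, "already"), (3, "together"), (3, "again"), (3, "while"), (3, "during"),
   (3, "now"), (3, "later"), (3, "soon"),
   (4, "i"), (4, "you"), (4, "he"), (4, "she"), (4, "it"), (4, "we"),
   (4, "they"), (4, "me"), (4, "him"), (4, "her"), (4, "them"),
   (5, "in"), (5, "on"), (5, "at"), (5, "with"), (5, "by"), (5, "from"),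
   (5, "to"), (5, "for"), (5, "of")]

def guess_pos_alt (translation : String) : String :=
  if translation == "" then "UNKNOWN"
  else
    let t := PySem.Str.strip (PySem.Str.lower translation)
    if PySem.Str.startswith t "to " then "VERB"
    else
      let tl := t.toList
      let best : Nat := (PySem.List.pyRange 0 tl.length 1).foldl (fun best i =>
        pvKeywords.foldl (fun best pk =>
          if pk.1 < best ∧ PySem.List.slice tl (some i) (some (i + (pk.2.length : Int))) = pk.2.toList
          then pk.1 else best) best) 6
      if best == 6 then "UNKNOWN" else (PySem.List.pyGet? pvLabels (best : Int)).getD "UNKNOWN"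

-- ===== PRECONDITION & SPEC =====
def Spec_guess_pos (translation : String) (out : String) : Prop := out = guess_pos_alt translation
instance (translation : String) (out : String) : Decidable (Spec_guess_pos translation out) := by unfold Spec_guess_pos; infer_instance

-- ===== CLAIM (what is proved, stated in full; the proofs are below) =====
def Claim_equal_guess_pos : Prop := ∀ (translation : String), Dom_guess_pos translation → Spec_guess_pos translation (guess_pos translation)

-- ===== LEMMAS AND PROOFS =====

-- category table used by the proofs: category p's keyword list as A writes it
def pvCat : Nat → List String
  | 0 => ["(man-", "(maN-", "(on-", "(-en)", "(-an)"]
  | 1 => ["thing", "place", "person", "animal", "tree", "food", "object", "name", "part"]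
  | 2 => ["ugly", "red", "white", "blue", "big", "small", "tired", "good", "bad", "beautiful"]
  | 3 => ["already", "together", "again", "while", "during", "now", "later", "soon"]
  | 4 => ["i", "you", "he", "she", "it", "we", "they", "me", "him", "her", "them"]
  | 5 => ["in", "on", "at", "with", "by", "from", "to", "for", "of"]
  | _ => []

def pvHit (u : String) (p : Nat) : Bool := (pvCat p).any (fun x => PySem.Str.isIn x u)

-- the keyword table agrees with the category table (finite checks)
lemma pvKw_cat : ∀ pk ∈ pvKeywords, pk.2 ∈ pvCat pk.1 := by decide
lemma pvCat_kw : ∀ p, p < 6 → ∀ kw ∈ pvCat p, (p, kw) ∈ pvKeywords := by decide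
lemma pvKw_ne_nil : ∀ pk ∈ pvKeywords, pk.2.toList ≠ [] := by decide
lemma pvKw_lt6 : ∀ pk ∈ pvKeywords, pk.1 < 6 := by decide

-- the min-accumulating fold: bounded by its input, a lower bound of every
-- selected element, and either untouched or itself a selected element
lemma pvFoldMin {α : Type} (f : α → Nat) (C : α → Prop) [DecidablePred C] :
    ∀ (L : List α) (b : Nat),
      L.foldl (fun best a => if f a < best ∧ C a then f a else best) b ≤ b
      ∧ (∀ a ∈ L, C a → L.foldl (fun best a => if f a < best ∧ C a then f a else best) b ≤ f a)
      ∧ (L.foldl (fun best a => if f a < best ∧ C a then f a else best) b = b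
          ∨ ∃ a ∈ L, C a ∧ f a = L.foldl (fun best a => if f a < best ∧ C a then f a else best) b) := by
  intro L
  induction L with
  | nil => intro b; simp
  | cons a L ih =>
    intro b
    obtain ⟨h1, h2, h3⟩ := ih (if f a < b ∧ C a then f a else b)
    have hb'le : (if f a < b ∧ C a then f a else b) ≤ b := by split_ifs with h <;> omega
    have hb'a : C a → (if f a < b ∧ C a then f a else b) ≤ f a := by
      intro hC; split_ifs with h
      · omega
      · have : ¬ f a < b := fun hlt => h ⟨hlt, hC⟩
        omega
    refine ⟨?_, ?_, ?_⟩
    · simp only [List.foldl_cons]; omega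
    · intro x hx hCx
      rcases List.mem_cons.1 hx with rfl | hx
      · simp only [List.foldl_cons]; have := hb'a hCx; omega
      · simp only [List.foldl_cons]; exact h2 x hx hCx
    · simp only [List.foldl_cons]
      rcases h3 with h3 | ⟨x, hx, hCx, hfx⟩
      · by_cases h : f a < b ∧ C a
        · right
          refine ⟨a, by simp, h.2, ?_⟩
          rw [h3, if_pos h]
        · left; rw [h3, if_neg h]
      · right; exact ⟨x, List.mem_cons_of_mem _ hx, hCx, hfx⟩

-- nested fold over positions × keyword table = flat fold over the pair list
lemma pvFlatten {α β : Type} (K : List β) (step : Nat → α → β → Nat) :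
    ∀ (I : List α) (b : Nat),
      I.foldl (fun b i => K.foldl (fun b pk => step b i pk) b) b
        = (I.flatMap (fun i => K.map (fun pk => (i, pk)))).foldl (fun b x => step b x.1 x.2) b := by
  intro I
  induction I with
  | nil => intro b; simp
  | cons i I ih =>
    intro b
    simp only [List.foldl_cons, List.flatMap_cons, List.foldl_append, List.foldl_map, ih]

-- a keyword of priority p matches at some scanned position iff A's substring
-- test for category p succeeds
lemma pvPairHit (u : String) (p : Nat) (hp : p < 6) :
    (∃ x ∈ (PySem.List.pyRange 0 u.toList.length 1).flatMap
        (fun i => pvKeywords.map (fun pk => (i, pk))),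
      (PySem.List.slice u.toList (some x.1) (some (x.1 + (x.2.2.length : Int))) = x.2.2.toList)
        ∧ x.2.1 = p)
    ↔ pvHit u p = true := by
  constructor
  · rintro ⟨x, hmem, hsl, hpk⟩
    simp only [List.mem_flatMap, List.mem_map] at hmem
    obtain ⟨i, hi', pk, hpk', rfl⟩ := hmem
    simp only at hsl hpk
    have hi := (PySem.List.mem_pyRange_one).1 hi'
    have h0 : (0:Int) ≤ i := hi.1
    obtain ⟨j, rfl⟩ : ∃ j : Nat, i = (j : Int) := ⟨i.toNat, (Int.toNat_of_nonneg h0).symm⟩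
    rw [PySem.List.slice_natCast_add] at hsl
    have hpre : pk.2.toList <+: u.toList.drop j := by
      rw [List.prefix_iff_eq_take, String.length_toList, hsl]
    have hin : PySem.Chars.isIn pk.2.toList u.toList = true :=
      (PySem.Chars.exists_prefix_drop_iff_isIn pk.2.toList u.toList).1 ⟨j, hpre⟩
    have hstr : PySem.Str.isIn pk.2 u = true := by
      rw [show PySem.Str.isIn pk.2 u = PySem.Chars.isIn pk.2.toList u.toList from rfl]; exact hin
    simp only [pvHit, List.any_eq_true]
    exact ⟨pk.2, by rw [← hpk]; exact pvKw_cat pk hpk', hstr⟩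
  · intro h
    simp only [pvHit, List.any_eq_true] at h
    obtain ⟨kw, hkw, hin⟩ := h
    have hmemK : (p, kw) ∈ pvKeywords := pvCat_kw p hp kw hkw
    have hne : kw.toList ≠ [] := pvKw_ne_nil (p, kw) hmemK
    have hin' : PySem.Chars.isIn kw.toList u.toList = true := by
      rw [show PySem.Str.isIn kw u = PySem.Chars.isIn kw.toList u.toList from rfl] at hin; exact hin
    obtain ⟨j, hpre⟩ := (PySem.Chars.exists_prefix_drop_iff_isIn kw.toList u.toList).2 hin'
    have hj : j < u.toList.length := by
      by_contra hge
      rw [List.drop_eq_nil_of_le (Nat.le_of_not_lt hge)] at hpre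
      exact hne (List.prefix_nil.1 hpre)
    refine ⟨((j : Int), (p, kw)), ?_, ?_, rfl⟩
    · simp only [List.mem_flatMap, List.mem_map]
      exact ⟨(j : Int), PySem.List.mem_pyRange_one.2 ⟨by positivity, by exact_mod_cast hj⟩,
        ⟨(p, kw), hmemK, rfl⟩⟩
    · rw [PySem.List.slice_natCast_add]
      rw [List.prefix_iff_eq_take, String.length_toList] at hpre
      exact hpre.symm

-- full characterisation of B's accumulator
lemma pvBest_spec (u : String) :
    (∀ p, p < 6 → pvHit u p = true → (PySem.List.pyRange 0 u.toList.length 1).foldl (fun best i =>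
      pvKeywords.foldl (fun best pk =>
        if pk.1 < best ∧ PySem.List.slice u.toList (some i) (some (i + (pk.2.length : Int))) = pk.2.toList
        then pk.1 else best) best) 6 ≤ p)
    ∧ ((PySem.List.pyRange 0 u.toList.length 1).foldl (fun best i =>
      pvKeywords.foldl (fun best pk =>
        if pk.1 < best ∧ PySem.List.slice u.toList (some i) (some (i + (pk.2.length : Int))) = pk.2.toList
        then pk.1 else best) best) 6 = 6 ∨ ((PySem.List.pyRange 0 u.toList.length 1).foldl (fun best i =>
      pvKeywords.foldl (fun best pk =>
        if pk.1 < best ∧ PySem.List.slice u.toList (some i) (some (i + (pk.2.length : Int))) = pk.2.toList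
        then pk.1 else best) best) 6 < 6 ∧ pvHit u ((PySem.List.pyRange 0 u.toList.length 1).foldl (fun best i =>
      pvKeywords.foldl (fun best pk =>
        if pk.1 < best ∧ PySem.List.slice u.toList (some i) (some (i + (pk.2.length : Int))) = pk.2.toList
        then pk.1 else best) best) 6) = true)) := by
  have hflat := pvFlatten pvKeywords
    (fun (b : Nat) (i : Int) (pk : Nat × String) =>
      if pk.1 < b ∧ PySem.List.slice u.toList (some i) (some (i + (pk.2.length : Int))) = pk.2.toList
      then pk.1 else b)
    (PySem.List.pyRange 0 u.toList.length 1) 6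
  have hmin := pvFoldMin (fun x : Int × (Nat × String) => x.2.1)
    (fun x : Int × (Nat × String) =>
      PySem.List.slice u.toList (some x.1) (some (x.1 + (x.2.2.length : Int))) = x.2.2.toList)
    ((PySem.List.pyRange 0 u.toList.length 1).flatMap (fun i => pvKeywords.map (fun pk => (i, pk)))) 6
  rw [hflat]
  obtain ⟨hle, hlb, hreach⟩ := hmin
  constructor
  · intro p hp hhit
    obtain ⟨x, hx, hC, hxp⟩ := (pvPairHit u p hp).2 hhit
    calc _ ≤ x.2.1 := hlb x hx hC
    _ = p := hxp
  · rcases hreach with h | ⟨x, hx, hC, hfx⟩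
    · left; exact h
    · right
      have hx6 : x.2.1 < 6 := by
        simp only [List.mem_flatMap, List.mem_map] at hx
        obtain ⟨i', _, pk', hpk', heq⟩ := hx
        have := pvKw_lt6 pk' hpk'
        cases heq
        exact this
      refine ⟨by omega, ?_⟩
      rw [← hfx]
      exact (pvPairHit u x.2.1 hx6).1 ⟨x, hx, hC, rfl⟩

-- ===== VERDICT (by name: the statement is the Claim_ definition above) =====
theorem guess_pos_spec : Claim_equal_guess_pos := by
  intro t _
  unfold Spec_guess_pos guess_pos guess_pos_alt
  by_cases hE : t == ""
  · simp [hE]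
  simp only [hE, Bool.false_eq_true, if_false]
  by_cases hT : PySem.Str.startswith (PySem.Str.strip (PySem.Str.lower t)) "to "
  · rw [if_pos hT, if_pos hT]
  simp only [hT, Bool.false_eq_true, if_false]
  generalize PySem.Str.strip (PySem.Str.lower t) = u
  obtain ⟨hlb, hreach⟩ := pvBest_spec u
  set best := (PySem.List.pyRange 0 u.toList.length 1).foldl (fun best i =>
      pvKeywords.foldl (fun best pk =>
        if pk.1 < best ∧ PySem.List.slice u.toList (some i) (some (i + (pk.2.length : Int))) = pk.2.toList
        then pk.1 else best) best) 6 with hbest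
  by_cases h0 : (["(man-", "(maN-", "(on-", "(-en)", "(-an)"].any fun x => PySem.Str.isIn x u) = true
  · have hb : best = 0 := by
      have := hlb 0 (by omega) h0; omega
    rw [hb, if_pos h0]; decide
  by_cases h1 : (["thing", "place", "person", "animal", "tree", "food", "object", "name", "part"].any fun x => PySem.Str.isIn x u) = true
  · have hb : best = 1 := by
      have hub := hlb 1 (by omega) h1
      rcases hreach with h6 | ⟨_, hhit⟩
      · omega
      · interval_cases best
        · exact absurd hhit h0
        · rfl
    rw [hb, if_neg h0, if_pos h1]; decide
  by_cases h2 : (["ugly", "red", "white", "blue", "big", "small", "tired", "good", "bad", "beautiful"].any fun x => PySem.Str.isIn x u) = true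
  · have hb : best = 2 := by
      have hub := hlb 2 (by omega) h2
      rcases hreach with h6 | ⟨_, hhit⟩
      · omega
      · interval_cases best
        · exact absurd hhit h0
        · exact absurd hhit h1
        · rfl
    rw [hb, if_neg h0, if_neg h1, if_pos h2]; decide
  by_cases h3 : (["already", "together", "again", "while", "during", "now", "later", "soon"].any fun x => PySem.Str.isIn x u) = true
  · have hb : best = 3 := by
      have hub := hlb 3 (by omega) h3
      rcases hreach with h6 | ⟨_, hhit⟩
      · omega
      · interval_cases best
        · exact absurd hhit h0
        · exact absurd hhit h1
        · exact absurd hhit h2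
        · rfl
    rw [hb, if_neg h0, if_neg h1, if_neg h2, if_pos h3]; decide
  by_cases h4 : (["i", "you", "he", "she", "it", "we", "they", "me", "him", "her", "them"].any fun x => PySem.Str.isIn x u) = true
  · have hb : best = 4 := by
      have hub := hlb 4 (by omega) h4
      rcases hreach with h6 | ⟨_, hhit⟩
      · omega
      · interval_cases best
        · exact absurd hhit h0
        · exact absurd hhit h1
        · exact absurd hhit h2
        · exact absurd hhit h3
        · rfl
    rw [hb, if_neg h0, if_neg h1, if_neg h2, if_neg h3, if_pos h4]; decide
  by_cases h5 : (["in", "on", "at", "with", "by", "from", "to", "for", "of"].any fun x => PySem.Str.isIn x u) = true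
  · have hb : best = 5 := by
      have hub := hlb 5 (by omega) h5
      rcases hreach with h6 | ⟨_, hhit⟩
      · omega
      · interval_cases best
        · exact absurd hhit h0
        · exact absurd hhit h1
        · exact absurd hhit h2
        · exact absurd hhit h3
        · exact absurd hhit h4
        · rfl
    rw [hb, if_neg h0, if_neg h1, if_neg h2, if_neg h3, if_neg h4, if_pos h5]; decide
  · have hb : best = 6 := by
      rcases hreach with h6 | ⟨hlt, hhit⟩
      · exact h6
      · have hub : best ≤ 5 := by omega
        interval_cases best
        · exact absurd hhit h0
        · exact absurd hhit h1
        · exact absurd hhit h2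
        · exact absurd hhit h3
        · exact absurd hhit h4
        · exact absurd hhit h5
    rw [hb, if_neg h0, if_neg h1, if_neg h2, if_neg h3, if_neg h4, if_neg h5]; decide
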